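-- pv_equiv track=rewrite | github.com/BenjaminGabay/Wordle | wordleBotTest2_failedAlgo.py | getPossibleResults
-- ===== SOURCE A (Python) =====
-- WORD_LENGTH = 5
--
-- def getPossibleResults(prevRes=''):
--     possRes = []
--     for i in range(3):
--         for j in range(3):
--             for k in range(3):
--                 for l in range(3):
--                     for m in range(3):
--                         res = ""
--                         if i == 0:
--                             res += 'b'
--                         if i == 1:
--                             res += 'y'
--                         if i == 2:
--                             res += 'g'
--                         if j == 0:
--                             res += 'b'
--                         if j == 1:
--                             res += 'y'
--                         if j == 2:
--                             res += 'g'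
--                         if k == 0:
--                             res += 'b'
--                         if k == 1:
--                             res += 'y'
--                         if k == 2:
--                             res += 'g'
--                         if l == 0:
--                             res += 'b'
--                         if l == 1:
--                             res += 'y'
--                         if l == 2:
--                             res += 'g'
--                         if m == 0:
--                             res += 'b'
--                         if m == 1:
--                             res += 'y'
--                         if m == 2:
--                             res += 'g'
--                         possRes.append(res)
--     for i in [i for i in range(WORD_LENGTH) if prevRes[i] == 'g']:
--         possRes = [r for r in possRes if r[i] == 'g']
--     return possRes
-- ===== SOURCE B (Python) =====
-- WORD_LENGTH = 5
--
-- def getPossibleResults(prevRes=''):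
--     # Build only the patterns that survive the green filter: at each position,
--     # a green in prevRes fixes 'g', otherwise all of 'b','y','g' in order.
--     possRes = ['']
--     for i in range(WORD_LENGTH):
--         choices = 'g' if prevRes[i] == 'g' else 'byg'
--         possRes = [s + c for s in possRes for c in choices]
--     return possRes
-- ===== Notes on version B (the rewrite author's own statement) =====
-- stated objective: alternative
-- what changed: Instead of enumerating all 243 patterns with five nested 3-way loops and then repeatedly filtering the list by each green position, B builds the list position by position, offering only the green letter at positions where prevRes is green and all three letters elsewhere, so only the surviving patterns are ever generated.
import Mathlib
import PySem

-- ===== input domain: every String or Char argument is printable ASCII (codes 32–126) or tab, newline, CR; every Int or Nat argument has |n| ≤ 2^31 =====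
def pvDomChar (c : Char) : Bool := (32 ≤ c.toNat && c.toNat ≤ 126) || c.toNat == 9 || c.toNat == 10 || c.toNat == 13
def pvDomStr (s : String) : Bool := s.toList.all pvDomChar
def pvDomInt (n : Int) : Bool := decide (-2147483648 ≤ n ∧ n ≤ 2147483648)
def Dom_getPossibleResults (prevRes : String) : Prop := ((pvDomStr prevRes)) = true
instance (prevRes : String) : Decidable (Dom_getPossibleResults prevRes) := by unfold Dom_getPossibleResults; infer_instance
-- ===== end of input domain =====

-- B replaces A's enumerate-243-then-filter with directly generating, position by
-- position, only the patterns that survive the green filter.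

-- ===== PORT A =====
-- the three 'if v == 0/1/2: res += b/y/g' statements of A for one loop variable
-- (strings are built as List Char, Python-exact; String.ofList at append time)
def gprAppend (res : List Char) (v : Int) : List Char :=
  let res := if v = 0 then res ++ ['b'] else res
  let res := if v = 1 then res ++ ['y'] else res
  if v = 2 then res ++ ['g'] else res

def getPossibleResults (prevRes : String) : List String :=
  let possRes : List String :=
    (PySem.List.pyRange 0 3 1).foldl (fun acc i =>
      (PySem.List.pyRange 0 3 1).foldl (fun acc j =>
        (PySem.List.pyRange 0 3 1).foldl (fun acc k =>
          (PySem.List.pyRange 0 3 1).foldl (fun acc l =>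
            (PySem.List.pyRange 0 3 1).foldl (fun acc m =>
              let res : List Char := []
              let res := gprAppend res i
              let res := gprAppend res j
              let res := gprAppend res k
              let res := gprAppend res l
              let res := gprAppend res m
              acc ++ [String.ofList res]) acc) acc) acc) acc) []
  -- for i in [i for i in range(WORD_LENGTH) if prevRes[i] == 'g']: possRes = [r for r in possRes if r[i] == 'g']
  let greens := (PySem.List.pyRange 0 5 1).filter
    (fun i => PySem.Str.pyGet? prevRes i == some 'g')
  greens.foldl (fun possRes i =>
    possRes.filter (fun r => PySem.Str.pyGet? r i == some 'g')) possRes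

-- ===== PORT B =====
def getPossibleResults_alt (prevRes : String) : List String :=
  (PySem.List.pyRange 0 5 1).foldl (fun possRes i =>
    let choices : List Char :=
      if PySem.Str.pyGet? prevRes i == some 'g' then ['g'] else ['b', 'y', 'g']
    possRes.flatMap (fun s => choices.map (fun c => s ++ String.ofList [c]))) [""]

-- ===== PRECONDITION & SPEC =====
-- A (and B) raise IndexError on prevRes[i] when len(prevRes) < 5; exclude exactly those.
def Pre_getPossibleResults (prevRes : String) : Prop := 5 ≤ PySem.Str.len prevRes
instance (prevRes : String) : Decidable (Pre_getPossibleResults prevRes) := by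
  unfold Pre_getPossibleResults; infer_instance
def pvWitness_getPossibleResults : String := "bgybg"

def Spec_getPossibleResults (prevRes : String) (out : List String) : Prop := out = getPossibleResults_alt prevRes
instance (prevRes : String) (out : List String) : Decidable (Spec_getPossibleResults prevRes out) := by unfold Spec_getPossibleResults; infer_instance

-- ===== CLAIM (what is proved, stated in full; the proofs are below) =====
def Claim_equal_getPossibleResults : Prop := ∀ (prevRes : String), Dom_getPossibleResults prevRes → Pre_getPossibleResults prevRes → Spec_getPossibleResults prevRes (getPossibleResults prevRes)

-- ===== LEMMAS AND PROOFS =====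

-- ===== VERDICT (by name: the statement is the Claim_ definition above) =====
set_option maxRecDepth 100000 in
theorem getPossibleResults_spec : Claim_equal_getPossibleResults := by
  intro prevRes _ _
  unfold Spec_getPossibleResults getPossibleResults getPossibleResults_alt
  have h5 : PySem.List.pyRange 0 5 1 = [0, 1, 2, 3, 4] := by decide
  simp only [h5, List.filter, List.foldl]
  -- the goal now depends on prevRes only through the five booleans prevRes[i] == 'g'
  cases h0 : PySem.Str.pyGet? prevRes 0 == some 'g' <;>
    cases h1 : PySem.Str.pyGet? prevRes 1 == some 'g' <;>
      cases h2 : PySem.Str.pyGet? prevRes 2 == some 'g' <;>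
        cases h3 : PySem.Str.pyGet? prevRes 3 == some 'g' <;>
          cases h4 : PySem.Str.pyGet? prevRes 4 == some 'g' <;> decide
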